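-- pv_equiv track=rewrite | github.com/ycchenlab/RAA_python_program | solve.py | collisionExtract
-- ===== SOURCE A (Python) =====
-- def collisionExtract(list_gate_qubits):
--     # 完整 全部commute 才用的到
--     """Extract collision relations between the gates,
--     If two gates g_1 and g_2 both acts on a qubit (at different time),
--     we say that g_1 and g_2 collide on that qubit, which means that
--     (1,2) will be in collision list.
--     Args:
--         list_gate_qubits: a list of gates in OLSQ IR
--
--     Returns:
--         list_collision: a list of collisions between the gates
--     """
--
--     list_collision = list()
--     # 會碰再一起的gate
--     # We sweep through all the gates.  For each gate, we sweep through all the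
--     # gates after it, if they both act on some qubit, append them in the list.
--     for g in range(len(list_gate_qubits)):
--         for gg in range(g + 1, len(list_gate_qubits)):
--
--             if list_gate_qubits[g][0] == list_gate_qubits[gg][0]:
--                 list_collision.append((g, gg))
--
--             if len(list_gate_qubits[gg]) == 2:
--                 if list_gate_qubits[g][0] == list_gate_qubits[gg][1]:
--                     list_collision.append((g, gg))
--
--             if len(list_gate_qubits[g]) == 2:
--                 if list_gate_qubits[g][1] == list_gate_qubits[gg][0]:
--                     list_collision.append((g, gg))
--                 if len(list_gate_qubits[gg]) == 2:
--                     if list_gate_qubits[g][1] == list_gate_qubits[gg][1]: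
--                         list_collision.append((g, gg))
--
--     return tuple(list_collision)
-- ===== SOURCE B (Python) =====
-- def collisionExtract(list_gate_qubits):
--     """Index qubit -> occurrence list of gate indices, then count shared-qubit
--     gate pairs per group and emit them in sorted order with multiplicity."""
--     # A gate contributes its two qubits when it has exactly two, else only its
--     # first qubit (the original only ever inspects positions 0 and 1, and
--     # position 1 only when the gate's length is exactly 2).
--     occ = {}
--     for i, gate in enumerate(list_gate_qubits):
--         qubits = gate if len(gate) == 2 else gate[:1]
--         for q in qubits:
--             occ.setdefault(q, []).append(i)
--     cnt = {}
--     for idxs in occ.values():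
--         for a in range(len(idxs)):
--             for gg in idxs[a + 1:]:
--                 if idxs[a] != gg:
--                     key = (idxs[a], gg)
--                     cnt[key] = cnt.get(key, 0) + 1
--     out = []
--     for pair in sorted(cnt):
--         out += [pair] * cnt[pair]
--     return tuple(out)
-- ===== Notes on version B (the rewrite author's own statement) =====
-- stated objective: alternative
-- what changed: Instead of A's all-pairs double loop with four positional equality tests, B builds a qubit->gate-occurrence index in one pass, counts colliding pairs only inside each shared-qubit group, and emits the pairs sorted with their multiplicity; output-sensitive (near-linear when collisions are sparse), but on adversarial inputs where every gate shares one qubit the output itself is quadratic and B is not faster than A.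
import Mathlib
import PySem

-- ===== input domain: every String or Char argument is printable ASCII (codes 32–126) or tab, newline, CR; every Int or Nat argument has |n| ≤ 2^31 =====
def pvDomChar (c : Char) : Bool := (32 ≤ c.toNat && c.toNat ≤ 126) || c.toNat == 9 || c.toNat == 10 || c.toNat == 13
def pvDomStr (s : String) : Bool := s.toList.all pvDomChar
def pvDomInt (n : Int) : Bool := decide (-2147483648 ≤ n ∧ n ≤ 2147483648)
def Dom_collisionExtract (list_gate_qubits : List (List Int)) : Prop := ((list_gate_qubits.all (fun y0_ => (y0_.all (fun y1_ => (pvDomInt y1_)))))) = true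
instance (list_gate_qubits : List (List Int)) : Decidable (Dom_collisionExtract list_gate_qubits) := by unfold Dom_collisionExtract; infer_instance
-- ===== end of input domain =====

-- B replaces A's all-pairs scan by a qubit->gate-occurrence index whose shared-qubit groups
-- yield the colliding pairs with their multiplicity, emitted in sorted (= A's emission) order
-- (an alternative, output-sensitive strategy). Equivalence is about the return value.

-- ===== PORT A =====
-- the body of A's inner loop, on the two gate lists x = l[g], y = l[gg]
def stepCore (x y : List Int) (g gg : Int) (acc : List (Int × Int)) : List (Int × Int) :=
  let acc1 := if PySem.List.pyGetD x 0 0 = PySem.List.pyGetD y 0 0 then acc ++ [(g, gg)] else acc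
  let acc2 := if y.length = 2 then
      (if PySem.List.pyGetD x 0 0 = PySem.List.pyGetD y 1 0 then acc1 ++ [(g, gg)] else acc1)
    else acc1
  if x.length = 2 then
    let acc3 := if PySem.List.pyGetD x 1 0 = PySem.List.pyGetD y 0 0 then acc2 ++ [(g, gg)] else acc2
    if y.length = 2 then
      (if PySem.List.pyGetD x 1 0 = PySem.List.pyGetD y 1 0 then acc3 ++ [(g, gg)] else acc3)
    else acc3
  else acc2

def stepA (l : List (List Int)) (g : Int) (acc : List (Int × Int)) (gg : Int) : List (Int × Int) :=
  stepCore (PySem.List.pyGetD l g []) (PySem.List.pyGetD l gg []) g gg acc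

def collisionExtract (list_gate_qubits : List (List Int)) : List (Int × Int) :=
  (PySem.List.pyRange 0 list_gate_qubits.length).foldl
    (fun acc g =>
      (PySem.List.pyRange (g + 1) list_gate_qubits.length).foldl (stepA list_gate_qubits g) acc)
    []

-- ===== PORT B =====
-- A gate contributes both its qubits when it has exactly two, else only its first (gate[:1]).
def qubitsOf (gate : List Int) : List Int :=
  if gate.length = 2 then gate else PySem.List.slice gate none (some 1)

def collisionExtract_alt (list_gate_qubits : List (List Int)) : List (Int × Int) :=
  let occ : PySem.Dict Int (List Int) :=
    (PySem.List.enumerate list_gate_qubits).foldl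
      (fun d p => (qubitsOf p.2).foldl (fun d q => d.modify q [] (fun v => v ++ [p.1])) d)
      PySem.Dict.empty
  let cnt : PySem.Dict (Int × Int) Int :=
    occ.values.foldl
      (fun c idxs =>
        (PySem.List.pyRange 0 idxs.length).foldl
          (fun c a =>
            (PySem.List.slice idxs (some (a + 1)) none).foldl
              (fun c gg =>
                if PySem.List.pyGetD idxs a 0 ≠ gg then
                  c.modify (PySem.List.pyGetD idxs a 0, gg) 0 (fun v => v + 1)
                else c)
              c)
          c)
      PySem.Dict.empty
  (PySem.List.sorted2 cnt.keys (fun p => p.1) (fun p => p.2)).foldl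
    (fun out p => out ++ PySem.List.pyRepeat [p] (cnt.getD p 0)) []

-- ===== PRECONDITION & SPEC =====
-- Pre_ excludes exactly the inputs on which A raises IndexError: with at least two gates,
-- every gate must be a nonempty list (A reads gate[0] of every gate in that case).
def Pre_collisionExtract (list_gate_qubits : List (List Int)) : Prop :=
  list_gate_qubits.length ≤ 1 ∨ ∀ g ∈ list_gate_qubits, g ≠ []
instance (list_gate_qubits : List (List Int)) : Decidable (Pre_collisionExtract list_gate_qubits) := by
  unfold Pre_collisionExtract; infer_instance

def pvWitness_collisionExtract : List (List Int) := [[0, 1], [1, 2], [2]]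

def Spec_collisionExtract (list_gate_qubits : List (List Int)) (out : List (Int × Int)) : Prop :=
  out = collisionExtract_alt list_gate_qubits
instance (list_gate_qubits : List (List Int)) (out : List (Int × Int)) : Decidable (Spec_collisionExtract list_gate_qubits out) := by
  unfold Spec_collisionExtract; infer_instance

-- ===== CLAIM (what is proved, stated in full; the proofs are below) =====
def Claim_equal_collisionExtract : Prop := ∀ (list_gate_qubits : List (List Int)), Dom_collisionExtract list_gate_qubits → Pre_collisionExtract list_gate_qubits → Spec_collisionExtract list_gate_qubits (collisionExtract list_gate_qubits)

-- ===== LEMMAS AND PROOFS =====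
-- proof-side abbreviations: the canonical per-pair form shared by both sides
def gateAt (l : List (List Int)) (g : Int) : List Int := PySem.List.pyGetD l g []

def multQ (x y : List Int) : Nat := (x.map (fun q => y.count q)).sum

def segAB (l : List (List Int)) (g gg : Int) : List (Int × Int) :=
  List.replicate (multQ (qubitsOf (gateAt l g)) (qubitsOf (gateAt l gg))) (g, gg)

def canon (l : List (List Int)) : List (Int × Int) :=
  (PySem.List.pyRange 0 l.length).flatMap
    (fun g => (PySem.List.pyRange (g + 1) l.length).flatMap (segAB l g))

def pairsQ (l : List (List Int)) : List (Int × Int) :=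
  (PySem.List.enumerate l).flatMap (fun p => (qubitsOf p.2).map (fun q => (q, p.1)))

def occD (l : List (List Int)) : PySem.Dict Int (List Int) :=
  (pairsQ l).foldl (fun d z => d.modify z.1 [] (fun v => v ++ [z.2])) PySem.Dict.empty

def occList (l : List (List Int)) (q : Int) : List Int :=
  (PySem.List.pyRange 0 l.length).flatMap
    (fun j => List.replicate ((qubitsOf (gateAt l j)).count q) j)

def pairList (idxs : List Int) : List (Int × Int) :=
  (PySem.List.pyRange 0 idxs.length).flatMap
    (fun a => ((PySem.List.slice idxs (some (a + 1)) none).filter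
        (fun gg => decide (PySem.List.pyGetD idxs a 0 ≠ gg))).map
      (fun gg => (PySem.List.pyGetD idxs a 0, gg)))

def PlAll (l : List (List Int)) : List (Int × Int) := (occD l).values.flatMap pairList

def cntD (l : List (List Int)) : PySem.Dict (Int × Int) Int :=
  (PlAll l).foldl (fun c z => c.modify z 0 (fun v => v + 1)) PySem.Dict.empty

def bOut (l : List (List Int)) : List (Int × Int) :=
  (PySem.List.sorted2 (cntD l).keys (fun p => p.1) (fun p => p.2)).flatMap
    (fun p => List.replicate ((cntD l).getD p 0).toNat p)

def LexLE (a b : Int × Int) : Prop := a.1 < b.1 ∨ (a.1 = b.1 ∧ a.2 ≤ b.2)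

def ltB (a b : Int × Int) : Bool := decide (a.1 < b.1) || (!decide (b.1 < a.1) && decide (a.2 < b.2))

-- ## generic counting lemmas
theorem sum_map_ite {A : Type} [DecidableEq A] (R : List A) (hR : R.Nodup) (h : A -> Nat) (x : A) :
    (R.map (fun g => if g = x then h g else 0)).sum = if x ∈ R then h x else 0 := by
  induction R with
  | nil => simp
  | cons a R ih =>
    simp only [List.nodup_cons] at hR
    by_cases hax : a = x
    · subst hax
      simp [ih hR.2, hR.1]
    · simp [hax, ih hR.2, List.mem_cons, Ne.symm hax]

theorem count_flatMap_replicate {A B : Type} [DecidableEq A] [BEq B] [LawfulBEq B]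
    (R : List A) (hR : R.Nodup) (m : A -> Nat) (f : A -> B) (hf : Function.Injective f) (x : A) :
    ((R.flatMap (fun j => List.replicate (m j) (f j))).count (f x)) = if x ∈ R then m x else 0 := by
  rw [List.count_flatMap]
  have h1 : ∀ j, (List.count (f x) ∘ fun j => List.replicate (m j) (f j)) j
      = if j = x then m j else 0 := by
    intro j
    simp only [Function.comp_apply, List.count_replicate, beq_iff_eq, hf.eq_iff]
  rw [show (List.count (f x) ∘ fun j => List.replicate (m j) (f j))
      = fun j => if j = x then m j else 0 from funext h1]
  exact sum_map_ite R hR m x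

theorem count_flatMap_replicate_ne {A B : Type} [BEq B] [LawfulBEq B]
    (R : List A) (m : A -> Nat) (f : A -> B) (y : B) (hy : ∀ j ∈ R, f j ≠ y) :
    ((R.flatMap (fun j => List.replicate (m j) (f j))).count y) = 0 := by
  rw [List.count_eq_zero]
  intro hmem
  rcases List.mem_flatMap.mp hmem with ⟨j, hj, hyj⟩
  exact hy j hj (List.eq_of_mem_replicate hyj).symm

theorem sum_map_add_nat {A : Type} (S : List A) (f g : A -> Nat) :
    (S.map (fun q => f q + g q)).sum = (S.map f).sum + (S.map g).sum := by
  induction S with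
  | nil => simp
  | cons a S ih => simp [ih]; omega

theorem sum_count_mul (S : List Int) (hS : S.Nodup) (X Y : List Int) (hX : ∀ q ∈ X, q ∈ S) :
    (S.map (fun q => X.count q * Y.count q)).sum = multQ X Y := by
  induction X with
  | nil => simp [multQ]
  | cons a X ih =>
    have expand : ∀ q ∈ S, (a :: X).count q * Y.count q
        = X.count q * Y.count q + (if q = a then Y.count q else 0) := by
      intro q _
      rw [List.count_cons]
      by_cases h : q = a
      · subst h; simp [Nat.add_mul]
      · simp [h, Ne.symm h]
    rw [List.map_congr_left expand, sum_map_add_nat, ih (fun q hq => hX q (List.mem_cons_of_mem a hq))]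
    have h2 : (S.map (fun q => if q = a then Y.count q else 0)).sum
        = if a ∈ S then Y.count a else 0 := sum_map_ite S hS (fun q => Y.count q) a
    rw [h2, if_pos (hX a List.mem_cons_self)]
    simp [multQ]
    omega

-- ## A-side: the double loop appends exactly multQ copies of each pair
theorem pyGetD_cons_zero (a : Int) (xs : List Int) (d : Int) :
    PySem.List.pyGetD (a :: xs) 0 d = a := by
  rw [PySem.List.pyGetD_of_nonneg _ _ (by norm_num)]; rfl

theorem pyGetD_cons_one (a b : Int) (xs : List Int) (d : Int) :
    PySem.List.pyGetD (a :: b :: xs) 1 d = b := by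
  rw [PySem.List.pyGetD_of_nonneg _ _ (by norm_num)]; rfl

theorem qubitsOf_one (a : Int) : qubitsOf [a] = [a] := by
  simp [qubitsOf, PySem.List.slice_to]

theorem qubitsOf_two (a b : Int) : qubitsOf [a, b] = [a, b] := by
  simp [qubitsOf]

theorem qubitsOf_big (a b c : Int) (xs : List Int) : qubitsOf (a :: b :: c :: xs) = [a] := by
  simp [qubitsOf, PySem.List.slice_to]

theorem stepCore_eq (x y : List Int) (hx : x ≠ []) (hy : y ≠ []) (g gg : Int)
    (acc : List (Int × Int)) :
    stepCore x y g gg acc = acc ++ List.replicate (multQ (qubitsOf x) (qubitsOf y)) (g, gg) := by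
  rcases x with _ | ⟨x0, _ | ⟨x1, _ | ⟨x2, xs⟩⟩⟩
  · exact absurd rfl hx
  all_goals (
    rcases y with _ | ⟨y0, _ | ⟨y1, _ | ⟨y2, ys⟩⟩⟩
    · exact absurd rfl hy
    all_goals (
      simp only [stepCore, qubitsOf_one, qubitsOf_two, qubitsOf_big, multQ,
        pyGetD_cons_zero, pyGetD_cons_one, List.length_cons, List.length_nil,
        List.map_cons, List.map_nil, List.count_cons, List.count_nil, List.sum_cons,
        List.sum_nil, beq_iff_eq]
      norm_num
      split_ifs <;> simp [List.replicate_add] <;> omega))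

theorem stepA_eq (l : List (List Int)) (g : Int) (acc : List (Int × Int)) (gg : Int)
    (hx : gateAt l g ≠ []) (hy : gateAt l gg ≠ []) :
    stepA l g acc gg = acc ++ segAB l g gg := by
  unfold gateAt at hx hy
  exact stepCore_eq _ _ hx hy g gg acc

theorem A_eq_canon (l : List (List Int)) (h : Pre_collisionExtract l) :
    collisionExtract l = canon l := by
  unfold collisionExtract canon
  have houter : ∀ (acc : List (Int × Int)), ∀ g ∈ PySem.List.pyRange 0 (l.length : Int),
      (PySem.List.pyRange (g + 1) (l.length : Int)).foldl (stepA l g) acc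
        = acc ++ (PySem.List.pyRange (g + 1) (l.length : Int)).flatMap (segAB l g) := by
    intro acc g hg
    obtain ⟨hg0, hg1⟩ := PySem.List.mem_pyRange_one.mp hg
    rcases h with hlen | hne
    · have hnil : PySem.List.pyRange (g + 1) (l.length : Int) = [] :=
        PySem.List.pyRange_one_eq_nil (by omega)
      simp [hnil]
    · have hstep : ∀ (acc2 : List (Int × Int)), ∀ gg ∈ PySem.List.pyRange (g + 1) (l.length : Int),
          stepA l g acc2 gg = acc2 ++ segAB l g gg := by
        intro acc2 gg hgg
        obtain ⟨hgg0, hgg1⟩ := PySem.List.mem_pyRange_one.mp hgg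
        refine stepA_eq l g acc2 gg ?_ ?_
        · have : gateAt l g ∈ l := by
            unfold gateAt
            rw [PySem.List.pyGetD_eq_getElem _ _ hg0 hg1]
            exact List.getElem_mem _
          exact hne _ this
        · have hgg0' : (0:Int) ≤ gg := by omega
          have : gateAt l gg ∈ l := by
            unfold gateAt
            rw [PySem.List.pyGetD_eq_getElem _ _ hgg0' hgg1]
            exact List.getElem_mem _
          exact hne _ this
      rw [PySem.List.foldl_congr_mem _ _ (fun acc2 gg => acc2 ++ segAB l g gg) _ hstep,
        PySem.List.foldl_append_eq_flatMap]
  rw [PySem.List.foldl_congr_mem _ _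
      (fun acc g => acc ++ (PySem.List.pyRange (g + 1) (l.length : Int)).flatMap (segAB l g)) _ houter,
    PySem.List.foldl_append_eq_flatMap]
  simp

-- ## B-side: unfolding the three phases
theorem alt_eq (l : List (List Int)) : collisionExtract_alt l = bOut l := by
  unfold collisionExtract_alt bOut cntD PlAll occD pairsQ pairList
  simp only [PySem.List.foldl_ite_eq_foldl_filter, List.flatMap_def, List.foldl_flatten,
    List.foldl_map, PySem.List.foldl_append_eq_flatMap, PySem.List.pyRepeat_singleton,
    List.nil_append, List.map_map]

theorem filterTag (xs : List Int) (i q : Int) :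
    ((xs.map (fun a => (a, i))).filter (fun z => z.1 == q)).map (fun z => z.2)
      = List.replicate (xs.count q) i := by
  induction xs with
  | nil => simp
  | cons a xs ih =>
    by_cases h : a = q
    · subst h; simp [List.count_cons, ih, List.replicate_succ]
    · simp [h, List.count_cons, Ne.symm h, ih]

theorem occ_chunks (L : List (Int × List Int)) (q : Int) :
    ((L.flatMap (fun p => (qubitsOf p.2).map (fun a => (a, p.1)))).filter (fun z => z.1 == q)).map
        (fun z => z.2)
      = L.flatMap (fun p => List.replicate ((qubitsOf p.2).count q) p.1) := by
  induction L with
  | nil => simp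
  | cons p L ih => simp [List.flatMap_cons, List.filter_append, List.map_append, filterTag, ih]

theorem getD_occD (l : List (List Int)) (q : Int) : (occD l).getD q [] = occList l q := by
  unfold occD occList pairsQ
  rw [PySem.Dict.getD_foldl_modify_append, PySem.Dict.getD_empty, List.nil_append, occ_chunks,
    PySem.List.enumerate_eq_map_pyRange l ([] : List Int), List.flatMap_map]
  rfl

theorem keys_occD (l : List (List Int)) :
    (occD l).keys = PySem.Set.ofList ((pairsQ l).map (fun z => z.1)) := by
  unfold occD
  have h := PySem.Dict.keys_foldl_modify_key (pairsQ l) (fun z => z.1) ([] : List Int)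
    (fun _ z => fun v => v ++ [z.2]) PySem.Dict.empty
  rw [PySem.Dict.keys_empty] at h
  exact h

theorem nodup_keys_occD (l : List (List Int)) : (occD l).keys.Nodup := by
  rw [keys_occD]; exact PySem.Set.nodup_ofList _

theorem mem_keys_occD (l : List (List Int)) (x q : Int) (hx0 : 0 ≤ x) (hx1 : x < (l.length : Int))
    (hq : q ∈ qubitsOf (gateAt l x)) : q ∈ (occD l).keys := by
  rw [keys_occD]
  refine (PySem.Set.mem_ofList _ _).mpr ?_
  refine List.mem_map.mpr ⟨(q, x), ?_, rfl⟩
  unfold pairsQ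
  refine List.mem_flatMap.mpr ⟨(x, gateAt l x), ?_, List.mem_map.mpr ⟨q, hq, rfl⟩⟩
  refine (PySem.List.mem_enumerate_iff l 0 _).mpr ⟨x.toNat, by omega, ?_⟩
  have h1 : (0 : Int) + (x.toNat : Int) = x := by omega
  have h2 : gateAt l x = l[x.toNat] := by
    unfold gateAt; exact PySem.List.pyGetD_eq_getElem l [] hx0 hx1
  rw [h1, h2]

theorem count_occList (l : List (List Int)) (q x : Int) :
    (occList l q).count x =
      if 0 ≤ x ∧ x < (l.length : Int) then (qubitsOf (gateAt l x)).count q else 0 := by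
  unfold occList
  have h := count_flatMap_replicate (PySem.List.pyRange 0 (l.length : Int))
    (PySem.List.nodup_pyRange_one 0 _) (fun j => (qubitsOf (gateAt l j)).count q)
    (fun j => j) (fun _ _ hh => hh) x
  simpa [PySem.List.mem_pyRange_one] using h

theorem pairwise_occList (l : List (List Int)) (q : Int) :
    (occList l q).Pairwise (fun a b => a ≤ b) := by
  unfold occList
  rw [List.flatMap_def, List.pairwise_flatten]
  constructor
  · intro c hc
    rcases List.mem_map.mp hc with ⟨j, _, rfl⟩
    exact List.pairwise_replicate.mpr (Or.inr le_rfl)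
  · rw [List.pairwise_map]
    refine List.Pairwise.imp ?_ (PySem.List.pairwise_lt_pyRange_one 0 _)
    intro a b hab u hu v hv
    rw [List.eq_of_mem_replicate hu, List.eq_of_mem_replicate hv]
    omega

theorem pyRange_succ_shift (a b : Int) :
    PySem.List.pyRange (a + 1) (b + 1) = (PySem.List.pyRange a b).map (fun j => j + 1) := by
  have key : ∀ (n : Nat) (a b : Int), (b - a).toNat = n →
      PySem.List.pyRange (a + 1) (b + 1) = (PySem.List.pyRange a b).map (fun j => j + 1) := by
    intro n
    induction n with
    | zero =>
      intro a b hn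
      rw [PySem.List.pyRange_one_eq_nil (by omega), PySem.List.pyRange_one_eq_nil (by omega)]
      rfl
    | succ n ih =>
      intro a b hn
      have hab : a < b := by omega
      rw [PySem.List.pyRange_one_cons hab, PySem.List.pyRange_one_cons (by omega : a + 1 < b + 1),
        List.map_cons, ih (a + 1) b (by omega)]
  exact key (b - a).toNat a b rfl

theorem pairList_cons (i : Int) (rest : List Int) :
    pairList (i :: rest) =
      ((rest.filter (fun gg => decide (i ≠ gg))).map (fun gg => (i, gg))) ++ pairList rest := by
  unfold pairList
  have hlen : (((i :: rest).length : Nat) : Int) = (rest.length : Int) + 1 := by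
    push_cast [List.length_cons]; ring
  rw [hlen, PySem.List.pyRange_one_cons (by omega : (0:Int) < (rest.length : Int) + 1),
    List.flatMap_cons]
  congr 1
  · rw [PySem.List.slice_from _ (by norm_num : (0:Int) ≤ 0 + 1), pyGetD_cons_zero]
    norm_num
  · rw [show (0:Int) + 1 = 0 + 1 from rfl, pyRange_succ_shift 0 (rest.length : Int),
      List.flatMap_map, List.flatMap_def, List.flatMap_def]
    congr 1
    apply List.map_congr_left
    intro a ha
    obtain ⟨ha0, ha1⟩ := PySem.List.mem_pyRange_one.mp ha
    have hsl : PySem.List.slice (i :: rest) (some (a + 1 + 1)) none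
        = PySem.List.slice rest (some (a + 1)) none := by
      rw [PySem.List.slice_from _ (by omega : (0:Int) ≤ a + 1 + 1),
        PySem.List.slice_from _ (by omega : (0:Int) ≤ a + 1)]
      have : (a + 1 + 1).toNat = (a + 1).toNat + 1 := by omega
      rw [this, List.drop_succ_cons]
    have hget : PySem.List.pyGetD (i :: rest) (a + 1) 0 = PySem.List.pyGetD rest a 0 := by
      rw [PySem.List.pyGetD_of_nonneg _ _ (by omega : (0:Int) ≤ a + 1),
        PySem.List.pyGetD_of_nonneg _ _ ha0]
      have : (a + 1).toNat = a.toNat + 1 := by omega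
      rw [this, List.getD_cons_succ]
    rw [hsl, hget]

theorem count_pairList (idxs : List Int) (h : idxs.Pairwise (fun a b => a ≤ b)) (x y : Int) :
    (pairList idxs).count (x, y) = if x < y then idxs.count x * idxs.count y else 0 := by
  induction idxs with
  | nil =>
    have h0 : pairList ([] : List Int) = [] := by
      unfold pairList; norm_num [PySem.List.pyRange_one_eq_nil]
    simp [h0]
  | cons i rest ih =>
    rw [List.pairwise_cons] at h
    obtain ⟨hi, hrest⟩ := h
    rw [pairList_cons, List.count_append, ih hrest]
    have hhead : (((rest.filter (fun gg => decide (i ≠ gg))).map (fun gg => (i, gg))).count (x, y))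
        = if i = x ∧ i ≠ y then rest.count y else 0 := by
      by_cases hix : i = x
      · subst hix
        have hinj : Function.Injective (fun gg : Int => (i, gg)) := by
          intro a b hab; simpa using hab
        rw [show ((i : Int), y) = (fun gg : Int => (i, gg)) y from rfl,
          List.count_map_of_injective _ _ hinj]
        by_cases hiy : i = y
        · subst hiy
          rw [if_neg (by simp), List.count_eq_zero]
          intro hmem
          exact (by simpa using (List.mem_filter.mp hmem).2 : i ≠ i) rfl
        · rw [if_pos ⟨rfl, hiy⟩]
          exact List.count_filter (by simpa using hiy)
      · rw [if_neg (by tauto), List.count_eq_zero]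
        intro hmem
        rcases List.mem_map.mp hmem with ⟨gg, _, heq⟩
        exact hix ((Prod.mk.injEq _ _ _ _).mp heq).1
    rw [hhead]
    by_cases hxy : x < y
    · rw [if_pos hxy, if_pos hxy, List.count_cons, List.count_cons]
      by_cases hix : i = x
      · rw [if_pos ⟨hix, by omega⟩]
        have h1 : (i == x) = true := by rw [beq_iff_eq]; omega
        have h2 : (i == y) = false := by rw [beq_eq_false_iff_ne]; omega
        rw [h1, h2]
        simp
        ring
      · by_cases hiy : i = y
        · rw [if_neg (by tauto)]
          have hxz : rest.count x = 0 := by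
            rw [List.count_eq_zero]; intro hmem; have := hi x hmem; omega
          have h1 : (i == x) = false := by rw [beq_eq_false_iff_ne]; omega
          rw [h1, hxz]
          simp
        · rw [if_neg (by tauto)]
          have h1 : (i == x) = false := by rw [beq_eq_false_iff_ne]; omega
          have h2 : (i == y) = false := by rw [beq_eq_false_iff_ne]; omega
          rw [h1, h2]
          simp
    · rw [if_neg hxy, if_neg hxy]
      by_cases hd : i = x ∧ i ≠ y
      · rw [if_pos hd]
        have hz : rest.count y = 0 := by
          rw [List.count_eq_zero]; intro hmem; have := hi y hmem; omega
        simp [hz]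
      · rw [if_neg hd]

theorem getD_cntD (l : List (List Int)) (z : Int × Int) :
    (cntD l).getD z 0 = ((PlAll l).count z : Int) := by
  unfold cntD
  rw [PySem.Dict.getD_foldl_modify_add_one, PySem.Dict.getD_empty]
  ring

theorem keys_cntD (l : List (List Int)) : (cntD l).keys = PySem.Set.ofList (PlAll l) := by
  unfold cntD
  have h := PySem.Dict.keys_foldl_modify (PlAll l) (0 : Int) (fun _ _ => fun v => v + 1)
    PySem.Dict.empty
  rw [PySem.Dict.keys_empty] at h
  exact h

-- ## counts agree
theorem count_canon (l : List (List Int)) (x y : Int) :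
    (canon l).count (x, y) =
      if 0 ≤ x ∧ x < y ∧ y < (l.length : Int) then
        multQ (qubitsOf (gateAt l x)) (qubitsOf (gateAt l y))
      else 0 := by
  unfold canon
  rw [List.count_flatMap]
  have hterm : ∀ g, (List.count (x, y) ∘ fun g =>
        (PySem.List.pyRange (g + 1) (l.length : Int)).flatMap (segAB l g)) g
      = if g = x then
          (if y ∈ PySem.List.pyRange (g + 1) (l.length : Int) then
            multQ (qubitsOf (gateAt l g)) (qubitsOf (gateAt l y)) else 0)
        else 0 := by
    intro g
    simp only [Function.comp_apply]
    by_cases hgx : g = x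
    · subst hgx
      rw [if_pos rfl]
      have hinj : Function.Injective (fun gg : Int => (g, gg)) := by
        intro a b hab; simpa using hab
      have h := count_flatMap_replicate (PySem.List.pyRange (g + 1) (l.length : Int))
        (PySem.List.nodup_pyRange_one _ _)
        (fun gg => multQ (qubitsOf (gateAt l g)) (qubitsOf (gateAt l gg)))
        (fun gg => (g, gg)) hinj y
      unfold segAB
      exact h
    · rw [if_neg hgx]
      unfold segAB
      exact count_flatMap_replicate_ne _ _ (fun gg => (g, gg)) (x, y)
        (fun j _ heq => hgx ((Prod.mk.injEq _ _ _ _).mp heq).1)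
  rw [show (List.count (x, y) ∘ fun g =>
        (PySem.List.pyRange (g + 1) (l.length : Int)).flatMap (segAB l g))
      = fun g => if g = x then
          (if y ∈ PySem.List.pyRange (g + 1) (l.length : Int) then
            multQ (qubitsOf (gateAt l g)) (qubitsOf (gateAt l y)) else 0)
        else 0 from funext hterm]
  rw [sum_map_ite _ (PySem.List.nodup_pyRange_one 0 _)
    (fun g => if y ∈ PySem.List.pyRange (g + 1) (l.length : Int) then
      multQ (qubitsOf (gateAt l g)) (qubitsOf (gateAt l y)) else 0) x]
  simp only [PySem.List.mem_pyRange_one]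
  split_ifs <;> first | rfl | omega

theorem count_PlAll (l : List (List Int)) (x y : Int) :
    (PlAll l).count (x, y) = (canon l).count (x, y) := by
  unfold PlAll
  rw [List.count_flatMap,
    PySem.Dict.values_eq_map_keys (occD l) (nodup_keys_occD l) ([] : List Int), List.map_map]
  have hterm : ∀ q ∈ (occD l).keys,
      ((List.count (x, y) ∘ pairList) ∘ fun k => (occD l).getD k []) q
        = if x < y then (occList l q).count x * (occList l q).count y else 0 := by
    intro q _
    simp only [Function.comp_apply, getD_occD]
    exact count_pairList _ (pairwise_occList l q) x y
  rw [List.map_congr_left hterm, count_canon]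
  by_cases hxy : x < y
  · by_cases hcond : 0 ≤ x ∧ x < y ∧ y < (l.length : Int)
    · rw [if_pos hcond]
      have hpt : ∀ q ∈ (occD l).keys,
          (if x < y then (occList l q).count x * (occList l q).count y else 0)
            = (qubitsOf (gateAt l x)).count q * (qubitsOf (gateAt l y)).count q := by
        intro q _
        rw [if_pos hxy, count_occList, count_occList,
          if_pos ⟨hcond.1, by omega⟩, if_pos ⟨by omega, hcond.2.2⟩]
      rw [List.map_congr_left hpt]
      exact sum_count_mul (occD l).keys (nodup_keys_occD l) _ _
        (fun q hq => mem_keys_occD l x q hcond.1 (by omega) hq)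
    · rw [if_neg hcond]
      have hpt : ∀ q ∈ (occD l).keys,
          (if x < y then (occList l q).count x * (occList l q).count y else 0) = 0 := by
        intro q _
        rw [if_pos hxy, count_occList, count_occList]
        by_cases h1 : 0 ≤ x ∧ x < (l.length : Int)
        · rw [if_pos h1, if_neg (by omega)]
          simp
        · rw [if_neg h1]
          simp
      rw [List.map_congr_left hpt]
      simp
  · rw [if_neg (by omega)]
    have hpt : ∀ q ∈ (occD l).keys,
        (if x < y then (occList l q).count x * (occList l q).count y else 0) = 0 := by
      intro q _; rw [if_neg hxy]
    rw [List.map_congr_left hpt]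
    simp

theorem count_bOut (l : List (List Int)) (z : Int × Int) :
    (bOut l).count z = (PlAll l).count z := by
  unfold bOut
  have hperm := PySem.List.sorted2_perm (cntD l).keys (fun p => p.1) (fun p => p.2) false
  have hnodupK : (cntD l).keys.Nodup := by
    rw [keys_cntD]; exact PySem.Set.nodup_ofList _
  have hnodup := (hperm.nodup_iff).mpr hnodupK
  have h := count_flatMap_replicate
    (PySem.List.sorted2 (cntD l).keys (fun p => p.1) (fun p => p.2)) hnodup
    (fun p => ((cntD l).getD p 0).toNat) (fun p => p) (fun _ _ hh => hh) z
  rw [h]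
  by_cases hz : z ∈ (cntD l).keys
  · rw [if_pos (hperm.mem_iff.mpr hz), getD_cntD]
    simp
  · rw [if_neg (fun hmem => hz (hperm.mem_iff.mp hmem))]
    have hnot : z ∉ PlAll l := fun hmem =>
      hz (by rw [keys_cntD]; exact (PySem.Set.mem_ofList _ _).mpr hmem)
    exact (List.count_eq_zero.mpr hnot).symm

-- ## order agrees
theorem ltB_le (a b : Int × Int) : ltB a b = true -> LexLE a b := by
  simp only [ltB, LexLE, Bool.or_eq_true, Bool.and_eq_true, Bool.not_eq_true',
    decide_eq_true_eq, decide_eq_false_iff_not]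
  omega

theorem not_ltB_ge (a b : Int × Int) : ltB a b = false -> LexLE b a := by
  simp only [ltB, LexLE, Bool.or_eq_false_iff, Bool.and_eq_false_iff, Bool.not_eq_false',
    decide_eq_true_eq, decide_eq_false_iff_not]
  omega

theorem LexLE_trans (a b c : Int × Int) : LexLE a b -> LexLE b c -> LexLE a c := by
  simp only [LexLE]; omega

theorem pairwise_insertBy (x : Int × Int) (ys : List (Int × Int)) (h : ys.Pairwise LexLE) :
    (PySem.List.insertBy ltB x ys).Pairwise LexLE := by
  induction ys with
  | nil => simp [PySem.List.insertBy]
  | cons y ys ih =>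
    rw [List.pairwise_cons] at h
    obtain ⟨hy, hys⟩ := h
    rw [PySem.List.insertBy.eq_2]
    by_cases hcmp : ltB x y = true
    · rw [if_pos hcmp]
      have hxy : LexLE x y := ltB_le x y hcmp
      refine List.Pairwise.cons ?_ (List.Pairwise.cons hy hys)
      intro z hz
      rcases List.mem_cons.mp hz with rfl | hzys
      · exact hxy
      · exact LexLE_trans x y z hxy (hy z hzys)
    · rw [if_neg hcmp]
      refine List.Pairwise.cons ?_ (ih hys)
      intro z hz
      rcases (PySem.List.mem_insertBy ltB x z ys).mp hz with hzx | hzys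
      · subst hzx; exact not_ltB_ge z y (by simpa using hcmp)
      · exact hy z hzys

theorem pairwise_sorted2_keys (xs : List (Int × Int)) :
    (PySem.List.sorted2 xs (fun p => p.1) (fun p => p.2)).Pairwise LexLE := by
  have key : ∀ (acc : List (Int × Int)), acc.Pairwise LexLE →
      (xs.foldl (fun acc x => PySem.List.insertBy ltB x acc) acc).Pairwise LexLE := by
    induction xs with
    | nil => intro acc h; simpa using h
    | cons x xs ih =>
      intro acc h
      exact ih _ (pairwise_insertBy x acc h)
  exact key [] List.Pairwise.nil

theorem mem_segAB (l : List (List Int)) (g gg : Int) (u : Int × Int) (hu : u ∈ segAB l g gg) :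
    u = (g, gg) := by
  unfold segAB at hu
  exact List.eq_of_mem_replicate hu

theorem mem_inner_canon (l : List (List Int)) (g : Int) (u : Int × Int)
    (hu : u ∈ (PySem.List.pyRange (g + 1) (l.length : Int)).flatMap (segAB l g)) :
    u.1 = g := by
  rcases List.mem_flatMap.mp hu with ⟨gg, _, hmem⟩
  rw [mem_segAB l g gg u hmem]

theorem pairwise_canon (l : List (List Int)) : (canon l).Pairwise LexLE := by
  unfold canon
  rw [List.flatMap_def, List.pairwise_flatten]
  constructor
  · intro c hc
    rcases List.mem_map.mp hc with ⟨g, _, rfl⟩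
    rw [List.flatMap_def, List.pairwise_flatten]
    constructor
    · intro c2 hc2
      rcases List.mem_map.mp hc2 with ⟨gg, _, rfl⟩
      unfold segAB
      exact List.pairwise_replicate.mpr (Or.inr (Or.inr ⟨rfl, le_rfl⟩))
    · rw [List.pairwise_map]
      refine List.Pairwise.imp ?_ (PySem.List.pairwise_lt_pyRange_one _ _)
      intro a b hab u hu v hv
      rw [mem_segAB l g a u hu, mem_segAB l g b v hv]
      exact Or.inr ⟨rfl, by omega⟩
  · rw [List.pairwise_map]
    refine List.Pairwise.imp ?_ (PySem.List.pairwise_lt_pyRange_one 0 _)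
    intro a b hab u hu v hv
    have h1 := mem_inner_canon l a u hu
    have h2 := mem_inner_canon l b v hv
    exact Or.inl (by omega)

theorem pairwise_bOut (l : List (List Int)) : (bOut l).Pairwise LexLE := by
  unfold bOut
  rw [List.flatMap_def, List.pairwise_flatten]
  constructor
  · intro c hc
    rcases List.mem_map.mp hc with ⟨p, _, rfl⟩
    exact List.pairwise_replicate.mpr (Or.inr (Or.inr ⟨rfl, le_rfl⟩))
  · rw [List.pairwise_map]
    refine List.Pairwise.imp ?_ (pairwise_sorted2_keys (cntD l).keys)
    intro a b hab u hu v hv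
    rw [List.eq_of_mem_replicate hu, List.eq_of_mem_replicate hv]
    exact hab

theorem LexLE_antisymm (a b : Int × Int) (h1 : LexLE a b) (h2 : LexLE b a) : a = b := by
  obtain ⟨a1, a2⟩ := a
  obtain ⟨b1, b2⟩ := b
  simp only [LexLE] at h1 h2
  simp only [Prod.mk.injEq]
  omega

theorem canon_eq_bOut (l : List (List Int)) : canon l = bOut l := by
  have hperm : (canon l).Perm (bOut l) := by
    rw [List.perm_iff_count]
    intro z
    obtain ⟨zx, zy⟩ := z
    rw [count_bOut, count_PlAll]
  exact List.Perm.eq_of_pairwise (fun a b _ _ => LexLE_antisymm a b)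
    (pairwise_canon l) (pairwise_bOut l) hperm

-- ===== VERDICT (by name: the statement is the Claim_ definition above) =====
theorem collisionExtract_spec : Claim_equal_collisionExtract := by
  intro l _ hpre
  unfold Spec_collisionExtract
  rw [A_eq_canon l hpre, canon_eq_bOut, alt_eq]
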